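-- pv_equiv track=rewrite | github.com/pypi-data/pypi-mirror-351 | packages/pseudopatch/pseudopatch-0.1.0-py3-none-any.whl/pseudopatch/patching.py | find_context_core
-- ===== SOURCE A (Python) =====
-- from typing import Dict, List, Optional, Tuple, Union
--
-- def find_context_core(
--     lines: List[str], context: List[str], start: int
-- ) -> Tuple[int, int]:
--     if not context:
--         return start, 0
--
--     for i in range(start, len(lines)):
--         if lines[i: i + len(context)] == context:
--             return i, 0
--     for i in range(start, len(lines)):
--         if [s.rstrip() for s in lines[i: i + len(context)]] == [
--             s.rstrip() for s in context
--         ]: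
--             return i, 1
--     for i in range(start, len(lines)):
--         if [s.strip() for s in lines[i: i + len(context)]] == [
--             s.strip() for s in context
--         ]:
--             return i, 100
--     return -1, 0
-- ===== SOURCE B (Python) =====
-- def find_context_core(lines, context, start):
--     # One pass: precompute stripped forms once, track first match per tier.
--     if not context:
--         return start, 0
--     m = len(context)
--     n = len(lines)
--     r_lines = [s.rstrip() for s in lines]
--     r_ctx = [s.rstrip() for s in context]
--     s_lines = [s.strip() for s in lines]
--     s_ctx = [s.strip() for s in context]
--     rfirst = sfirst = None
--     for i in range(start, n):
--         if lines[i:i+m] == context: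
--             return i, 0
--         if rfirst is None and r_lines[i:i+m] == r_ctx:
--             rfirst = i
--         if sfirst is None and s_lines[i:i+m] == s_ctx:
--             sfirst = i
--     if rfirst is not None:
--         return rfirst, 1
--     if sfirst is not None:
--         return sfirst, 100
--     return -1, 0
-- ===== Notes on version B (the rewrite author's own statement) =====
-- stated objective: alternative
-- what changed: A's three sequential scans, each re-stripping the whole context and each candidate window at every position, are replaced by a single pass over stripped lists computed once, tracking the first match of each tier and returning early on an exact match.
import Mathlib
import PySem

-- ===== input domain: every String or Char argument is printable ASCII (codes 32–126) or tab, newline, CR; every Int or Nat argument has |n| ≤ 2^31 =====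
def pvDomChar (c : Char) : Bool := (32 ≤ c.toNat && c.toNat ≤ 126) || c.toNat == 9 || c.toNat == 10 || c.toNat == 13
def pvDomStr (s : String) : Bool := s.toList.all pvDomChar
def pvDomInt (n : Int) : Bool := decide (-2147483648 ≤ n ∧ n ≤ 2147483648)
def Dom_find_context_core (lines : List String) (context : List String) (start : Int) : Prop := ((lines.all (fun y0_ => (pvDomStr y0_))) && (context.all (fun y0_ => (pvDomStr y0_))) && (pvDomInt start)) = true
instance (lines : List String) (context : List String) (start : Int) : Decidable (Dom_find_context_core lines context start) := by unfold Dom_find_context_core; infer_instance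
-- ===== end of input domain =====

-- B replaces A's three sequential scans (which re-strip the context window at every position)
-- by a single pass over precomputed stripped lists that tracks the first match of each tier;
-- objective: alternative decomposition. A is total, so there is no Pre_.

-- ===== PORT A =====
-- A: three for-loops over range(start, len(lines)), each returning at the first matching window.
def find_context_core (lines : List String) (context : List String) (start : Int) : List Int :=
  if context = [] then [start, 0]
  else
    let n : Int := (lines.length : Int)
    let m : Int := (context.length : Int)
    match List.find? (fun i =>
        decide (PySem.List.slice lines (some i) (some (i + m)) = context))
        (PySem.List.pyRange start n 1) with
    | some i => [i, 0]
    | none =>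
      match List.find? (fun i =>
          decide ((PySem.List.slice lines (some i) (some (i + m))).map PySem.Str.rstrip
            = context.map PySem.Str.rstrip)) (PySem.List.pyRange start n 1) with
      | some i => [i, 1]
      | none =>
        match List.find? (fun i =>
            decide ((PySem.List.slice lines (some i) (some (i + m))).map PySem.Str.strip
              = context.map PySem.Str.strip)) (PySem.List.pyRange start n 1) with
        | some i => [i, 100]
        | none => [-1, 0]

-- ===== PORT B =====
-- B's loop body: return at an exact match, otherwise record the first rstrip/strip match.
def fccAltLoop (lines context rLines rCtx sLines sCtx : List String) (m : Int) :
    List Int → Option Int → Option Int → List Int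
  | [], rfirst, sfirst =>
    match rfirst with
    | some j => [j, 1]
    | none =>
      match sfirst with
      | some j => [j, 100]
      | none => [-1, 0]
  | i :: rest, rfirst, sfirst =>
    if PySem.List.slice lines (some i) (some (i + m)) = context then [i, 0]
    else
      fccAltLoop lines context rLines rCtx sLines sCtx m rest
        (match rfirst with
         | none => if PySem.List.slice rLines (some i) (some (i + m)) = rCtx then some i else none
         | some j => some j)
        (match sfirst with
         | none => if PySem.List.slice sLines (some i) (some (i + m)) = sCtx then some i else none
         | some j => some j)

def find_context_core_alt (lines : List String) (context : List String) (start : Int) : List Int :=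
  if context = [] then [start, 0]
  else
    let m : Int := (context.length : Int)
    let n : Int := (lines.length : Int)
    let rLines := lines.map PySem.Str.rstrip
    let rCtx := context.map PySem.Str.rstrip
    let sLines := lines.map PySem.Str.strip
    let sCtx := context.map PySem.Str.strip
    fccAltLoop lines context rLines rCtx sLines sCtx m (PySem.List.pyRange start n 1) none none

-- ===== PRECONDITION & SPEC =====
def Spec_find_context_core (lines : List String) (context : List String) (start : Int) (out : List Int) : Prop := out = find_context_core_alt lines context start
instance (lines : List String) (context : List String) (start : Int) (out : List Int) : Decidable (Spec_find_context_core lines context start out) := by unfold Spec_find_context_core; infer_instance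

-- ===== CLAIM (what is proved, stated in full; the proofs are below) =====
def Claim_equal_find_context_core : Prop := ∀ (lines : List String) (context : List String) (start : Int), Dom_find_context_core lines context start → Spec_find_context_core lines context start (find_context_core lines context start)

-- ===== LEMMAS AND PROOFS =====

-- map commutes with Python slicing (slice is clamped drop/take; map preserves length)
theorem slice_map {α β : Type} (f : α → β) (xs : List α) (a b : Int) :
    PySem.List.slice (xs.map f) (some a) (some b) = (PySem.List.slice xs (some a) (some b)).map f := by
  simp [PySem.List.slice, PySem.List.clampIdx, List.map_drop, List.map_take]

-- characterisation of B's loop in terms of the three first-match searches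
theorem fccAltLoop_spec (lines context rLines rCtx sLines sCtx : List String) (m : Int)
    (idxs : List Int) (rfirst sfirst : Option Int) :
    fccAltLoop lines context rLines rCtx sLines sCtx m idxs rfirst sfirst =
      match List.find? (fun i => decide (PySem.List.slice lines (some i) (some (i + m)) = context)) idxs with
      | some i => [i, 0]
      | none =>
        match rfirst.or (List.find? (fun i => decide (PySem.List.slice rLines (some i) (some (i + m)) = rCtx)) idxs) with
        | some j => [j, 1]
        | none =>
          match sfirst.or (List.find? (fun i => decide (PySem.List.slice sLines (some i) (some (i + m)) = sCtx)) idxs) with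
          | some j => [j, 100]
          | none => [-1, 0] := by
  induction idxs generalizing rfirst sfirst with
  | nil => cases rfirst <;> cases sfirst <;> simp [fccAltLoop]
  | cons i rest ih =>
    by_cases h1 : PySem.List.slice lines (some i) (some (i + m)) = context
    · simp [fccAltLoop, h1]
    · simp only [fccAltLoop, if_neg h1, ih]
      simp only [List.find?_cons, h1, decide_false]
      cases rfirst <;> cases sfirst <;>
        by_cases h2 : PySem.List.slice rLines (some i) (some (i + m)) = rCtx <;>
        by_cases h3 : PySem.List.slice sLines (some i) (some (i + m)) = sCtx <;>
        simp [h2, h3]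

-- ===== VERDICT (by name: the statement is the Claim_ definition above) =====
theorem find_context_core_spec : Claim_equal_find_context_core := by
  intro lines context start _
  unfold Spec_find_context_core find_context_core find_context_core_alt
  by_cases hc : context = []
  · simp [hc]
  · simp only [if_neg hc, fccAltLoop_spec, Option.or, slice_map]
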